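-- pv_equiv track=rewrite | github.com/MBudzyn/University | AI/obrazki logiczne P1.py | choose_next_pixel
-- ===== SOURCE A (Python) =====
-- def calculate_fitness(spec, line):
--     current_block = 0
--     current_block_length = 0
--     fitness = 0
--     for i in range(len(line)):
--         if line[i] == '#':
--             current_block_length += 1
--         if line[i] == '.' or i == len(line) - 1:
--             if current_block < len(spec) and current_block_length == spec[current_block]:
--                 fitness += 1
--             elif current_block == len(spec) and current_block_length == 0:
--                 fitness += 1
--             current_block += 1
--             current_block_length = 0
--     return fitness
--
-- def choose_next_pixel(rows, cols, image):
--     max_fitness = 0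
--     chosen_pixel = None
--
--     for i in range(len(rows)):
--         for j in range(len(cols)):
--             if image[i][j] == '#':
--                 continue
--
--             current_fitness = calculate_fitness(rows[i], image[i]) + calculate_fitness(cols[j], [image[x][j] for x in range(len(rows))])
--             if current_fitness > max_fitness:
--                 max_fitness = current_fitness
--                 chosen_pixel = (i, j)
--
--     return chosen_pixel
-- ===== SOURCE B (Python) =====
-- def _fit(spec, line):
--     # closed block lengths: '#'-counts between '.' separators, plus a final
--     # close at end-of-line when the line is nonempty and doesn't end in '.'
--     blocks = []
--     cnt = 0
--     for ch in line:
--         if ch == '.':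
--             blocks.append(cnt)
--             cnt = 0
--         elif ch == '#':
--             cnt += 1
--     if line and line[-1] != '.':
--         blocks.append(cnt)
--     f = 0
--     for t, b in enumerate(blocks):
--         if t < len(spec):
--             if b == spec[t]:
--                 f += 1
--         elif t == len(spec) and b == 0:
--             f += 1
--     return f
--
-- def choose_next_pixel(rows, cols, image):
--     R, C = len(rows), len(cols)
--     if R == 0 or C == 0:
--         return None
--     row_fit = [_fit(rows[i], image[i]) for i in range(R)]
--     col_fit = [_fit(cols[j], [image[x][j] for x in range(R)]) for j in range(C)]
--     best = 0
--     pixel = None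
--     for i in range(R):
--         for j in range(C):
--             if image[i][j] != '#':
--                 f = row_fit[i] + col_fit[j]
--                 if f > best:
--                     best = f
--                     pixel = (i, j)
--     return pixel
-- ===== Notes on version B (the rewrite author's own statement) =====
-- stated objective: faster
-- what changed: B precomputes each row's and each column's fitness once (computing fitness by splitting the line into closed block lengths and comparing them to the spec) and then scans cells summing two lookups, instead of A's recomputation of both line fitnesses inside the double loop.
import Mathlib
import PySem

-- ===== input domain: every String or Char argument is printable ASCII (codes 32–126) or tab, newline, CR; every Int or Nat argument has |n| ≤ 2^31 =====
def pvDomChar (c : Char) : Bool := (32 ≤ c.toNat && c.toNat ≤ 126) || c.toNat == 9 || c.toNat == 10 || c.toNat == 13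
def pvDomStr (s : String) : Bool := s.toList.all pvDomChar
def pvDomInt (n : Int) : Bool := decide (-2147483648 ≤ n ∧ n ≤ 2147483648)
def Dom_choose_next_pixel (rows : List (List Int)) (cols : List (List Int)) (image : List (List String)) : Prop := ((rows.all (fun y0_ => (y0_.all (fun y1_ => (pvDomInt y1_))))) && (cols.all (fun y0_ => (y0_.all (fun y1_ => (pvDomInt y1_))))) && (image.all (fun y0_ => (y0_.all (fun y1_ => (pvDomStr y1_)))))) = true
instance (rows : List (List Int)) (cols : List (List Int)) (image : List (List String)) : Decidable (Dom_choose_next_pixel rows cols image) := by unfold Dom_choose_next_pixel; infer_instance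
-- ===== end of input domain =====

-- B precomputes each row's and each column's fitness once (splitting the line into closed block
-- lengths and scoring them against the spec) and then scans cells summing two lookups, instead of
-- A's recomputation of both line fitnesses inside the double loop.

-- ===== PORT A =====
-- loop body of calculate_fitness; state = (current_block, current_block_length, fitness)
def stepA (spec : List Int) (n : Int) (st : Int × Int × Int) (p : Int × String) : Int × Int × Int :=
  if p.2 = "." ∨ p.1 = n - 1 then
    (st.1 + 1, 0,
      if st.1 < (spec.length : Int) ∧
          (if p.2 = "#" then st.2.1 + 1 else st.2.1) = PySem.List.pyGetD spec st.1 0 then st.2.2 + 1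
      else if st.1 = (spec.length : Int) ∧ (if p.2 = "#" then st.2.1 + 1 else st.2.1) = 0 then st.2.2 + 1
      else st.2.2)
  else (st.1, (if p.2 = "#" then st.2.1 + 1 else st.2.1), st.2.2)

-- literal port of calculate_fitness: 'for i in range(len(line))' with line[i] = the enumerated pair
def calcFitA (spec : List Int) (line : List String) : Int :=
  ((PySem.List.enumerate line 0).foldl (stepA spec line.length) (0, 0, 0)).2.2

def choose_next_pixel (rows : List (List Int)) (cols : List (List Int)) (image : List (List String)) : Option (Int × Int) :=
  ((List.range rows.length).foldl (fun st i =>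
     (List.range cols.length).foldl (fun (st : Int × Option (Int × Int)) j =>
        if (image.getD i []).getD j "" = "#" then st
        else
          let cf := calcFitA (rows.getD i []) (image.getD i []) +
                    calcFitA (cols.getD j []) ((List.range rows.length).map (fun x => (image.getD x []).getD j ""))
          if cf > st.1 then (cf, some ((i : Int), (j : Int))) else st) st)
   ((0 : Int), (none : Option (Int × Int)))).2

-- ===== PORT B =====
-- loop body of Source B's first _fit loop; state = (blocks, cnt)
def stepB (st : List Int × Int) (ch : String) : List Int × Int :=
  if ch = "." then (st.1 ++ [st.2], 0)
  else if ch = "#" then (st.1, st.2 + 1) else st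

-- loop body of Source B's scoring loop over enumerate(blocks)
def scoreStep (spec : List Int) (f : Int) (tb : Int × Int) : Int :=
  if tb.1 < (spec.length : Int) then (if tb.2 = PySem.List.pyGetD spec tb.1 0 then f + 1 else f)
  else if tb.1 = (spec.length : Int) ∧ tb.2 = 0 then f + 1 else f

-- literal port of Source B's _fit
def calcFitB (spec : List Int) (line : List String) : Int :=
  let p := line.foldl stepB (([] : List Int), (0 : Int))
  let blocks := if line ≠ [] ∧ line.getLast? ≠ some "." then p.1 ++ [p.2] else p.1
  (PySem.List.enumerate blocks 0).foldl (scoreStep spec) 0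

def choose_next_pixel_alt (rows : List (List Int)) (cols : List (List Int)) (image : List (List String)) : Option (Int × Int) :=
  let R := rows.length
  let C := cols.length
  if R = 0 ∨ C = 0 then none
  else
    let rowFit := (List.range R).map (fun i => calcFitB (rows.getD i []) (image.getD i []))
    let colFit := (List.range C).map (fun j =>
        calcFitB (cols.getD j []) ((List.range R).map (fun x => (image.getD x []).getD j "")))
    ((List.range R).foldl (fun st i =>
       (List.range C).foldl (fun (st : Int × Option (Int × Int)) j =>
          if (image.getD i []).getD j "" ≠ "#" then
            if rowFit.getD i 0 + colFit.getD j 0 > st.1 then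
              (rowFit.getD i 0 + colFit.getD j 0, some ((i : Int), (j : Int)))
            else st
          else st) st)
     ((0 : Int), (none : Option (Int × Int)))).2

-- ===== PRECONDITION & SPEC =====
-- Pre_ excludes only the inputs on which Python A raises IndexError: both loops nonempty
-- (rows ≠ [] and cols ≠ []) while image lacks the R×C rectangle of cells the loops index.
def Pre_choose_next_pixel (rows : List (List Int)) (cols : List (List Int)) (image : List (List String)) : Prop :=
  rows = [] ∨ cols = [] ∨
    (rows.length ≤ image.length ∧ ∀ r ∈ image.take rows.length, cols.length ≤ r.length)
instance (rows : List (List Int)) (cols : List (List Int)) (image : List (List String)) : Decidable (Pre_choose_next_pixel rows cols image) := by unfold Pre_choose_next_pixel; infer_instance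

def pvWitness_choose_next_pixel : List (List Int) × List (List Int) × List (List String) :=
  ([[1]], [[1]], [["#", "."]])

def Spec_choose_next_pixel (rows : List (List Int)) (cols : List (List Int)) (image : List (List String)) (out : Option (Int × Int)) : Prop := out = choose_next_pixel_alt rows cols image
instance (rows : List (List Int)) (cols : List (List Int)) (image : List (List String)) (out : Option (Int × Int)) : Decidable (Spec_choose_next_pixel rows cols image out) := by unfold Spec_choose_next_pixel; infer_instance

-- ===== CLAIM (what is proved, stated in full; the proofs are below) =====
def Claim_equal_choose_next_pixel : Prop := ∀ (rows : List (List Int)) (cols : List (List Int)) (image : List (List String)), Dom_choose_next_pixel rows cols image → Pre_choose_next_pixel rows cols image → Spec_choose_next_pixel rows cols image (choose_next_pixel rows cols image)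

-- ===== LEMMAS AND PROOFS =====

-- indicator: the fitness contribution of closing block number t with length b
def ind (spec : List Int) (t : Int) (b : Int) : Int :=
  if t < (spec.length : Int) ∧ b = PySem.List.pyGetD spec t 0 then 1
  else if t = (spec.length : Int) ∧ b = 0 then 1 else 0

-- total score of a list of closed block lengths, block index starting at t
def scoreAux (spec : List Int) : List Int → Int → Int → Int
  | [], _, f => f
  | b :: bs, t, f => scoreAux spec bs (t + 1) (f + ind spec t b)

-- the closed block lengths A's scan produces from a remaining suffix, given the running '#'-count
def closes : List String → Int → List Int
  | [], _ => []
  | ch :: rest, cnt =>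
      if ch = "." ∨ rest = [] then
        (if ch = "#" then cnt + 1 else cnt) :: closes rest 0
      else closes rest (if ch = "#" then cnt + 1 else cnt)

theorem calcFitA_run (spec : List Int) (n : Int) (rest : List String) (s cb cnt fit : Int)
    (h : s + (rest.length : Int) = n) :
    ((PySem.List.enumerate rest s).foldl (stepA spec n) (cb, cnt, fit)).2.2
      = scoreAux spec (closes rest cnt) cb fit := by
  induction rest generalizing s cb cnt fit with
  | nil => simp [closes, scoreAux]
  | cons ch rest ih =>
    have hlen : s + 1 + (rest.length : Int) = n := by
      simp only [List.length_cons] at h; push_cast at h ⊢; omega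
    have hiff : (ch = "." ∨ s = n - 1) ↔ (ch = "." ∨ rest = []) := by
      constructor
      · rintro (h1 | h1)
        · exact Or.inl h1
        · right
          have hz : (rest.length : Int) = 0 := by omega
          exact List.length_eq_zero_iff.mp (by exact_mod_cast hz)
      · rintro (h1 | h1)
        · exact Or.inl h1
        · right; subst h1; simp at hlen; omega
    rw [PySem.List.enumerate_cons, List.foldl_cons]
    by_cases hc : ch = "." ∨ rest = []
    · have hst : stepA spec n (cb, cnt, fit) (s, ch)
          = (cb + 1, 0, fit + ind spec cb (if ch = "#" then cnt + 1 else cnt)) := by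
        unfold stepA ind
        rw [if_pos (by simpa using hiff.mpr hc)]
        simp only [Prod.mk.injEq, true_and]
        split_ifs <;> simp_all
      rw [hst, ih (s + 1) _ _ _ hlen]
      simp only [closes, if_pos hc, scoreAux]
    · have hst : stepA spec n (cb, cnt, fit) (s, ch)
          = (cb, (if ch = "#" then cnt + 1 else cnt), fit) := by
        unfold stepA
        rw [if_neg (by simpa using fun hx => hc (hiff.mp hx))]
      rw [hst, ih (s + 1) _ _ _ hlen]
      simp only [closes, if_neg hc]

theorem calcFitB_score (spec : List Int) (bs : List Int) (t f : Int) :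
    (PySem.List.enumerate bs t).foldl (scoreStep spec) f = scoreAux spec bs t f := by
  induction bs generalizing t f with
  | nil => simp [scoreAux]
  | cons b bs ih =>
    rw [PySem.List.enumerate_cons, List.foldl_cons]
    have hs : scoreStep spec f (t, b) = f + ind spec t b := by
      unfold scoreStep ind
      split_ifs <;> simp_all
    rw [hs, ih]
    simp [scoreAux]

theorem blocks_eq_closes (rest : List String) (acc : List Int) (cnt : Int) :
    (if rest ≠ [] ∧ rest.getLast? ≠ some "." then
       (rest.foldl stepB (acc, cnt)).1 ++ [(rest.foldl stepB (acc, cnt)).2]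
     else (rest.foldl stepB (acc, cnt)).1)
    = acc ++ closes rest cnt := by
  induction rest generalizing acc cnt with
  | nil => simp [closes]
  | cons ch rest ih =>
    by_cases hr : rest = []
    · subst hr
      rcases eq_or_ne ch "." with h1 | h1
      · subst h1; simp [stepB, closes]
      · rcases eq_or_ne ch "#" with h2 | h2
        · subst h2; simp [stepB, closes]
        · simp [stepB, closes, h1, h2]
    · have hlast : (ch :: rest).getLast? = rest.getLast? := by
        cases rest with
        | nil => exact absurd rfl hr
        | cons y ys => simp
      have hcond : ((ch :: rest) ≠ [] ∧ (ch :: rest).getLast? ≠ some ".")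
          ↔ (rest ≠ [] ∧ rest.getLast? ≠ some ".") := by simp [hlast, hr]
      rw [List.foldl_cons, if_congr hcond rfl rfl]
      rcases eq_or_ne ch "." with h1 | h1
      · subst h1
        have hs : stepB (acc, cnt) "." = (acc ++ [cnt], 0) := by simp [stepB]
        rw [hs, ih]
        simp [closes, hr]
      · rcases eq_or_ne ch "#" with h2 | h2
        · subst h2
          have hs : stepB (acc, cnt) "#" = (acc, cnt + 1) := by simp [stepB]
          rw [hs, ih]
          simp [closes, h1, hr]
        · have hs : stepB (acc, cnt) ch = (acc, cnt) := by simp [stepB, h1, h2]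
          rw [hs, ih]
          simp [closes, h1, h2, hr]

theorem calcFit_eq (spec : List Int) (line : List String) :
    calcFitA spec line = calcFitB spec line := by
  unfold calcFitA calcFitB
  rw [calcFitA_run spec (line.length : Int) line 0 0 0 0 (by simp), calcFitB_score]
  have hb := blocks_eq_closes line [] 0
  simp only [List.nil_append] at hb
  simp only [hb]

theorem getD_map_range' (f : Nat → Int) (R i : Nat) (h : i < R) :
    ((List.range R).map f).getD i 0 = f i := by
  rw [List.getD_eq_getElem?_getD, List.getElem?_map, List.getElem?_range h]
  rfl

theorem foldl_const {α β : Type} (l : List β) (init : α) :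
    l.foldl (fun st _ => st) init = init := by
  induction l generalizing init with
  | nil => rfl
  | cons x xs ih => exact ih init

theorem choose_next_pixel_eq (rows : List (List Int)) (cols : List (List Int)) (image : List (List String)) :
    choose_next_pixel rows cols image = choose_next_pixel_alt rows cols image := by
  unfold choose_next_pixel choose_next_pixel_alt
  by_cases h0 : rows.length = 0 ∨ cols.length = 0
  · rw [if_pos h0]
    rcases h0 with h0 | h0
    · rw [h0]; rfl
    · rw [h0]
      simp only [List.range_zero, List.foldl_nil]
      rw [foldl_const]
  · rw [if_neg h0]
    simp only []
    congr 1
    apply PySem.List.foldl_congr_mem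
    intro st i hi
    apply PySem.List.foldl_congr_mem
    intro st' j hj
    rw [List.mem_range] at hi hj
    by_cases hc : (image.getD i []).getD j "" = "#"
    · rw [if_pos hc, if_neg (show ¬(image.getD i []).getD j "" ≠ "#" from not_not_intro hc)]
    · rw [if_neg hc, if_pos hc]
      rw [getD_map_range' _ _ _ hi, getD_map_range' _ _ _ hj, calcFit_eq, calcFit_eq]

-- ===== VERDICT (by name: the statement is the Claim_ definition above) =====
theorem choose_next_pixel_spec : Claim_equal_choose_next_pixel := by
  intro rows cols image _ _
  unfold Spec_choose_next_pixel
  exact choose_next_pixel_eq rows cols image
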